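-- pv_equiv track=rewrite | github.com/llampwall/sentinel-kit | sentinelkit/sentinelkit/context/allowed_context.py | _glob_base
-- ===== SOURCE A (Python) =====
-- GLOB_MARKERS = frozenset({"*", "?", "["})
--
-- def _glob_base(pattern: str) -> str:
--     if not _has_glob(pattern):
--         return pattern or "."
--     idx = min(
--         (pattern.index(marker) for marker in GLOB_MARKERS if marker in pattern),
--         default=len(pattern),
--     )
--     base = pattern[:idx]
--     return base.rstrip("/") or "."
--
-- def _has_glob(pattern: str) -> bool:
--     return any(marker in pattern for marker in GLOB_MARKERS)
-- ===== SOURCE B (Python) =====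
-- GLOB_MARKERS = frozenset({"*", "?", "["})
--
-- def _glob_base(pattern: str) -> str:
--     idx = None
--     for i, ch in enumerate(pattern):
--         if ch in GLOB_MARKERS:
--             idx = i
--             break
--     if idx is None:
--         return pattern or "."
--     return pattern[:idx].rstrip("/") or "."
-- ===== Notes on version B (the rewrite author's own statement) =====
-- stated objective: simpler
-- what changed: A tests each of the three glob markers for membership and then takes the min of per-marker .index() scans; B does one left-to-right scan that stops at the first glob marker character and branches on whether one was found.
import Mathlib
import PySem

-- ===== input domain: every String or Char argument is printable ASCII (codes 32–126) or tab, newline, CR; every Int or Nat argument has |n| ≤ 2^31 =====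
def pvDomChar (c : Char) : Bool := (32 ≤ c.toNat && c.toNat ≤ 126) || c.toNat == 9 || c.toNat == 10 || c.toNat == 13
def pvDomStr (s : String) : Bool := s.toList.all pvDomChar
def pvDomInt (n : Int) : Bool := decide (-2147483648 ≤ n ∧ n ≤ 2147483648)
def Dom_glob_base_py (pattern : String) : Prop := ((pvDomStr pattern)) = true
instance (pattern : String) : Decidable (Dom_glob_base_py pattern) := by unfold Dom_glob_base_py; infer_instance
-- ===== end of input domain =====

-- B replaces A's per-marker membership-and-index scans with a single left-to-right
-- character scan for the first glob marker (objective: simpler, one pass instead of up to six).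

-- ===== PORT A =====
-- GLOB_MARKERS = frozenset({"*", "?", "["}); `any` and `min` over the set are
-- order-independent, so a fixed list order is a faithful port of the frozenset iteration.
def pvGlobMarkers : List String := ["*", "?", "["]

-- _has_glob: any(marker in pattern for marker in GLOB_MARKERS)
def pvHasGlob (pattern : String) : Bool :=
  pvGlobMarkers.any (fun m => PySem.Str.isIn m pattern)

-- base.rstrip("/"): exact port of str.rstrip with the one-char set {"/"} —
-- drop trailing '/' characters.
def pvRstripSlash (s : String) : String :=
  String.ofList (s.toList.rdropWhile (fun c => c == '/'))

def glob_base_py (pattern : String) : String :=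
  if !(pvHasGlob pattern) then
    (if pattern = "" then "." else pattern)        -- pattern or "."
  else
    -- min((pattern.index(m) for m in GLOB_MARKERS if m in pattern), default=len(pattern));
    -- pattern.index(m) never raises here (the generator filters on membership) and equals Str.find.
    let vals : List Int :=
      (pvGlobMarkers.filter (fun m => PySem.Str.isIn m pattern)).map
        (fun m => PySem.Str.find pattern m)
    let idx : Int :=
      match vals with
      | [] => PySem.Str.len pattern
      | v :: vs => vs.foldl min v
    let base := PySem.Str.slice pattern none (some idx)
    let b := pvRstripSlash base
    if b = "" then "." else b                      -- base.rstrip("/") or "."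

-- ===== PORT B =====
-- the single scan of Source B: index of the first character that is a glob marker
-- (the enumerate-and-break loop = findIdx?)
def glob_base_py_alt (pattern : String) : String :=
  match pattern.toList.findIdx? (fun c => c == '*' || c == '?' || c == '[') with
  | none => if pattern = "" then "." else pattern  -- pattern or "."
  | some i =>
      let base := String.ofList ((pattern.toList.take i).rdropWhile (fun c => c == '/'))
      if base = "" then "." else base              -- pattern[:idx].rstrip("/") or "."

-- ===== PRECONDITION & SPEC =====
def Spec_glob_base_py (pattern : String) (out : String) : Prop := out = glob_base_py_alt pattern
instance (pattern : String) (out : String) : Decidable (Spec_glob_base_py pattern out) := by unfold Spec_glob_base_py; infer_instance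

-- ===== CLAIM (what is proved, stated in full; the proofs are below) =====
def Claim_equal_glob_base_py : Prop := ∀ (pattern : String), Dom_glob_base_py pattern → Spec_glob_base_py pattern (glob_base_py pattern)

-- ===== LEMMAS AND PROOFS =====

-- [c] is a prefix of l iff l starts with c
theorem pv_singleton_prefix (c : Char) (l : List Char) : [c] <+: l ↔ l[0]? = some c := by
  cases l with
  | nil => simp
  | cons a t => simp [List.cons_prefix_cons, eq_comm]

-- [c] occurs at position j iff l[j]? = some c
theorem pv_singleton_prefix_drop (c : Char) (l : List Char) (j : ℕ) :
    [c] <+: l.drop j ↔ l[j]? = some c := by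
  rw [pv_singleton_prefix]
  simp [List.getElem?_drop]

-- membership of the one-char substring = membership of the char
theorem pv_isIn_singleton (c : Char) (l : List Char) :
    PySem.Chars.isIn [c] l = true ↔ c ∈ l := by
  rw [← PySem.Chars.exists_prefix_drop_iff_isIn]
  simp only [pv_singleton_prefix_drop]
  rw [List.mem_iff_getElem?]

-- find on a one-char substring: exact position
theorem pv_find_singleton_eq (c : Char) (l : List Char) (k : ℕ)
    (hk : l[k]? = some c) (hmin : ∀ j, j < k → l[j]? ≠ some c) :
    PySem.Chars.find l [c] = (k : ℤ) := by
  have hnn : 0 ≤ PySem.Chars.find l [c] := by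
    rw [PySem.Chars.find_nonneg_iff, ← PySem.Chars.isIn_iff_infix, pv_isIn_singleton]
    exact List.mem_iff_getElem?.mpr ⟨k, hk⟩
  obtain ⟨h1, h2⟩ := PySem.Chars.find_spec hnn
  rw [pv_singleton_prefix_drop] at h1
  have hEq : (PySem.Chars.find l [c]).toNat = k := by
    by_contra hne
    rcases Nat.lt_or_ge (PySem.Chars.find l [c]).toNat k with h | h
    · exact hmin _ h h1
    · exact h2 k (lt_of_le_of_ne h (fun he => hne he.symm))
        ((pv_singleton_prefix_drop c l k).mpr hk)
  omega

-- find is at least i when c does not occur before i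
theorem pv_find_singleton_ge (c : Char) (l : List Char) (i : ℕ)
    (hmem : c ∈ l) (hlt : ∀ j, j < i → l[j]? ≠ some c) :
    (i : ℤ) ≤ PySem.Chars.find l [c] := by
  have hnn : 0 ≤ PySem.Chars.find l [c] := by
    rw [PySem.Chars.find_nonneg_iff, ← PySem.Chars.isIn_iff_infix, pv_isIn_singleton]
    exact hmem
  obtain ⟨h1, _⟩ := PySem.Chars.find_spec hnn
  rw [pv_singleton_prefix_drop] at h1
  have : i ≤ (PySem.Chars.find l [c]).toNat := by
    by_contra h
    exact hlt _ (by omega) h1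
  omega

-- foldl min stays a member of the list
theorem pv_foldl_min_mem (v : Int) (vs : List Int) : vs.foldl min v ∈ v :: vs := by
  induction vs generalizing v with
  | nil => simp
  | cons w ws ih =>
      simp only [List.foldl_cons]
      rcases List.mem_cons.mp (ih (min v w)) with h | h
      · rw [h]
        rcases min_choice v w with hm | hm <;> rw [hm] <;> simp
      · exact List.mem_cons_of_mem _ (List.mem_cons_of_mem _ h)
  
-- foldl min is a lower bound
theorem pv_foldl_min_le (v : Int) (vs : List Int) : ∀ x ∈ v :: vs, vs.foldl min v ≤ x := by
  induction vs generalizing v with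
  | nil => simp
  | cons w ws ih =>
      intro x hx
      simp only [List.mem_cons] at hx
      simp only [List.foldl_cons]
      rcases hx with h | h | h
      · rw [h]; exact le_trans (ih (min v w) (min v w) (List.mem_cons_self)) (min_le_left _ _)
      · rw [h]; exact le_trans (ih (min v w) (min v w) (List.mem_cons_self)) (min_le_right _ _)
      · exact ih (min v w) x (by simp [h])

-- hasGlob agrees with the single scan finding a marker
theorem pv_hasGlob_iff (pattern : String) :
    pvHasGlob pattern = true ↔
      ∃ c ∈ pattern.toList, (c == '*' || c == '?' || c == '[') = true := by
  have h1 : ("*" : String).toList = ['*'] := rfl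
  have h2 : ("?" : String).toList = ['?'] := rfl
  have h3 : ("[" : String).toList = ['['] := rfl
  simp only [pvHasGlob, pvGlobMarkers, List.any_cons, List.any_nil, Bool.or_eq_true,
    Bool.or_false, PySem.Str.isIn_eq, h1, h2, h3, pv_isIn_singleton]
  constructor
  · rintro (h | h | h)
    · exact ⟨'*', h, by decide⟩
    · exact ⟨'?', h, by decide⟩
    · exact ⟨'[', h, by decide⟩
  · rintro ⟨c, hc, hp⟩
    have : c = '*' ∨ c = '?' ∨ c = '[' := by
      revert hp; simp; tauto
    rcases this with rfl | rfl | rfl <;> tauto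

-- ===== VERDICT (by name: the statement is the Claim_ definition above) =====
theorem glob_base_py_spec : Claim_equal_glob_base_py := by
  intro pattern _
  unfold Spec_glob_base_py glob_base_py glob_base_py_alt
  cases hF : pattern.toList.findIdx? (fun c => c == '*' || c == '?' || c == '[') with
  | none =>
      have hG : pvHasGlob pattern = false := by
        rw [List.findIdx?_eq_none_iff] at hF
        rw [← Bool.not_eq_true, pv_hasGlob_iff]
        rintro ⟨c, hc, hp⟩
        rw [hF c hc] at hp; cases hp
      simp [hG]
  | some i =>
      obtain ⟨hilen, hpi, hbefore⟩ := List.findIdx?_eq_some_iff_getElem.mp hF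
      set cs := pattern.toList with hcs
      -- no marker char occurs at an index < i
      have hnone : ∀ (c : Char), (c == '*' || c == '?' || c == '[') = true →
          ∀ j, j < i → cs[j]? ≠ some c := by
        intro c hc j hji habs
        have hjlen : j < cs.length := lt_trans hji hilen
        have : cs[j] = c := by
          rw [List.getElem?_eq_getElem hjlen] at habs
          exact Option.some.inj habs
        exact hbefore j hji (this ▸ hc)
      have hG : pvHasGlob pattern = true := by
        rw [pv_hasGlob_iff]
        exact ⟨cs[i], List.getElem_mem hilen, hpi⟩
      -- the candidate list and the computed minimum
      have hvals_ge : ∀ v ∈ (pvGlobMarkers.filter (fun m => PySem.Str.isIn m pattern)).map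
          (fun m => PySem.Str.find pattern m), (i : ℤ) ≤ v := by
        intro v hv
        obtain ⟨m, hm, rfl⟩ := List.mem_map.mp hv
        obtain ⟨hmM, hmIn⟩ := List.mem_filter.mp hm
        rw [PySem.Str.isIn_eq] at hmIn
        rw [PySem.Str.find_eq]
        simp only [pvGlobMarkers, List.mem_cons, List.not_mem_nil, or_false] at hmM
        rcases hmM with rfl | rfl | rfl
        · exact pv_find_singleton_ge '*' cs i ((pv_isIn_singleton _ _).mp hmIn)
            (hnone '*' (by decide))
        · exact pv_find_singleton_ge '?' cs i ((pv_isIn_singleton _ _).mp hmIn)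
            (hnone '?' (by decide))
        · exact pv_find_singleton_ge '[' cs i ((pv_isIn_singleton _ _).mp hmIn)
            (hnone '[' (by decide))
      have hvals_i : ((i : ℕ) : ℤ) ∈ (pvGlobMarkers.filter (fun m => PySem.Str.isIn m pattern)).map
          (fun m => PySem.Str.find pattern m) := by
        -- the marker string whose char is cs[i]
        have hmem : cs[i] ∈ cs := List.getElem_mem hilen
        have hki : cs[i]? = some cs[i] := List.getElem?_eq_getElem hilen
        have hiEq : ∀ (m0 : String), m0.toList = [cs[i]] → m0 ∈ pvGlobMarkers →
            ((i : ℕ) : ℤ) ∈ (pvGlobMarkers.filter (fun m => PySem.Str.isIn m pattern)).map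
              (fun m => PySem.Str.find pattern m) := by
          intro m0 htl hmm
          refine List.mem_map.mpr ⟨m0, List.mem_filter.mpr ⟨hmm, ?_⟩, ?_⟩
          · rw [PySem.Str.isIn_eq, htl, pv_isIn_singleton]; exact hmem
          · rw [PySem.Str.find_eq, htl]
            exact pv_find_singleton_eq cs[i] cs i hki (hnone cs[i] hpi)
        have : cs[i] = '*' ∨ cs[i] = '?' ∨ cs[i] = '[' := by
          revert hpi; simp; tauto
        rcases this with h | h | h
        · exact hiEq "*" (by rw [h]; rfl) (by simp [pvGlobMarkers])
        · exact hiEq "?" (by rw [h]; rfl) (by simp [pvGlobMarkers])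
        · exact hiEq "[" (by rw [h]; rfl) (by simp [pvGlobMarkers])
      -- hence A's idx = i
      simp only [hG, Bool.not_true, if_neg (by simp : ¬((false : Bool) = true))]
      cases hv : (pvGlobMarkers.filter (fun m => PySem.Str.isIn m pattern)).map
          (fun m => PySem.Str.find pattern m) with
      | nil => rw [hv] at hvals_i; cases hvals_i
      | cons v vs =>
          rw [hv] at hvals_ge hvals_i
          have hminmem := pv_foldl_min_mem v vs
          have hidx : vs.foldl min v = (i : ℤ) :=
            le_antisymm (pv_foldl_min_le v vs _ hvals_i) (hvals_ge _ hminmem)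
          have hmatch : (match v :: vs with
              | [] => PySem.Str.len pattern
              | v :: vs => List.foldl min v vs) = List.foldl min v vs := rfl
          rw [hmatch, hidx]
          -- the slice pattern[:i] is take i
          have hbase : (PySem.Str.slice pattern none (some (i : ℤ))).toList = cs.take i := by
            rw [PySem.Str.toList_slice, PySem.Chars.slice_eq_listSlice,
              PySem.List.slice_to_natCast]
          simp only [pvRstripSlash, hbase]
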